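-- pv_equiv track=rewrite | github.com/LookForeman/Python | Sort Positive.py | sortPos
-- ===== SOURCE A (Python) =====
-- def sortPos(list):
--
-- 	positiveList = []
-- 	negativeList = []
--
-- 	for i in list:
-- 		if i < 0:
-- 			negativeList.append(i)
-- 		else:
-- 			positiveList.append(i)
--
-- 	positiveList.sort()
--
-- 	return positiveList + negativeList
-- ===== SOURCE B (Python) =====
-- def sortPos(list):
--     # one stable sort: negatives keyed after non-negatives, original order kept by stability
--     return sorted(list, key=lambda x: (x < 0, 0 if x < 0 else x))
-- ===== Notes on version B (the rewrite author's own statement) =====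
-- stated objective: idiomatic
-- what changed: Replaced the explicit partition-into-two-lists-then-sort loop by a single stable sorted() call with the composite key (x < 0, 0 if x < 0 else x); stability keeps the negatives in input order after the sorted non-negatives.
import Mathlib
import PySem

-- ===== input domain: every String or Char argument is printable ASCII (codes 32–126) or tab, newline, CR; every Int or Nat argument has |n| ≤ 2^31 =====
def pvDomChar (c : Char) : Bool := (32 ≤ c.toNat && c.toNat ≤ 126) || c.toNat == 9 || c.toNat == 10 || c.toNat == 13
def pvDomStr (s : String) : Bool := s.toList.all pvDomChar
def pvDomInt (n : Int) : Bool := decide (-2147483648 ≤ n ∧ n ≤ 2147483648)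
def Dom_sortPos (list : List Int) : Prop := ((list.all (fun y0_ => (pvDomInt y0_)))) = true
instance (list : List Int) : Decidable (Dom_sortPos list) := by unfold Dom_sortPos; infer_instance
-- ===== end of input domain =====

-- B replaces A's partition-then-sort by one stable sort with composite key (x<0, max-with-0): idiomatic, same cost.


-- ===== PORT A =====
def sortPos (list : List Int) : List Int :=
  let r := list.foldl
    (fun (acc : List Int × List Int) i =>
      if i < 0 then (acc.1, acc.2 ++ [i]) else (acc.1 ++ [i], acc.2))
    ([], [])
  PySem.List.sorted r.1 (fun x => x) false ++ r.2

-- ===== PORT B =====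
def sortPos_alt (list : List Int) : List Int :=
  PySem.List.sorted2 list (fun x => decide (x < 0)) (fun x => if x < 0 then 0 else x) false

-- ===== PRECONDITION & SPEC =====
def Spec_sortPos (list : List Int) (out : List Int) : Prop := out = sortPos_alt list
instance (list : List Int) (out : List Int) : Decidable (Spec_sortPos list out) := by unfold Spec_sortPos; infer_instance

-- ===== CLAIM (what is proved, stated in full; the proofs are below) =====
def Claim_equal_sortPos : Prop := ∀ (list : List Int), Dom_sortPos list → Spec_sortPos list (sortPos list)

-- ===== LEMMAS AND PROOFS =====

-- B's lexicographic comparison function, spelled out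
def pvBefore (a b : Int) : Bool :=
  decide ((decide (a < 0)) < (decide (b < 0)))
    || (!decide ((decide (b < 0)) < (decide (a < 0)))
        && decide ((if a < 0 then (0:Int) else a) < (if b < 0 then (0:Int) else b)))

lemma pvBefore_neg {v y : Int} (hv : v < 0) : pvBefore v y = false := by
  unfold pvBefore
  by_cases hy : y < 0 <;> simp [hv, hy]

lemma pvBefore_nonneg_neg {v y : Int} (hv : ¬ v < 0) (hy : y < 0) : pvBefore v y = true := by
  unfold pvBefore; simp [hv, hy]

lemma pvBefore_nonneg_nonneg {v y : Int} (hv : ¬ v < 0) (hy : ¬ y < 0) :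
    pvBefore v y = decide (v < y) := by
  unfold pvBefore; simp [hv, hy]

-- inserting a nonnegative element into (sorted-nonnegs ++ negatives) inserts into the first part
lemma insert_nonneg_split (v : Int) (s n : List Int) (hv : ¬ v < 0)
    (hs : ∀ y ∈ s, ¬ y < 0) (hn : ∀ y ∈ n, y < 0) :
    PySem.List.insertBy pvBefore v (s ++ n)
      = PySem.List.insertBy (fun a b => decide (a < b)) v s ++ n := by
  induction s with
  | nil =>
    cases n with
    | nil => simp [PySem.List.insertBy]
    | cons y ys =>
      simp [PySem.List.insertBy, pvBefore_nonneg_neg hv (hn y (by simp))]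
  | cons a s ih =>
    have ha : ¬ a < 0 := hs a (by simp)
    by_cases hva : v < a
    · simp [PySem.List.insertBy, pvBefore_nonneg_nonneg hv ha, hva]
    · simp only [List.cons_append, PySem.List.insertBy, pvBefore_nonneg_nonneg hv ha,
        decide_eq_true_eq, hva, if_false]
      rw [ih (fun y hy => hs y (by simp [hy]))]

-- main loop invariant: B's insertion fold over (sorted-nonnegs ++ negatives) state
lemma inv (xs : List Int) : ∀ (s n : List Int), (∀ y ∈ s, ¬ y < 0) → (∀ y ∈ n, y < 0) →
    xs.foldl (fun acc x => PySem.List.insertBy pvBefore x acc) (s ++ n)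
      = (xs.filter (fun i => !decide (i < 0))).foldl
          (fun acc x => PySem.List.insertBy (fun a b => decide (a < b)) x acc) s
        ++ (n ++ xs.filter (fun i => decide (i < 0))) := by
  induction xs with
  | nil => intro s n _ _; simp
  | cons x xs ih =>
    intro s n hs hn
    by_cases hx : x < 0
    · have hins : PySem.List.insertBy pvBefore x (s ++ n) = s ++ (n ++ [x]) := by
        rw [← List.append_assoc]
        exact PySem.List.insertBy_of_forall_not_before _ _ _
          (fun y _ => pvBefore_neg hx)
      simp only [List.foldl_cons, hins]
      rw [ih s (n ++ [x]) hs (by intro y hy; rcases List.mem_append.1 hy with h | h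
                                 · exact hn y h
                                 · simp at h; omega)]
      simp [hx]
    · have hins := insert_nonneg_split x s n hx hs hn
      simp only [List.foldl_cons, hins]
      rw [ih _ n (by intro y hy
                     rcases (PySem.List.mem_insertBy _ _ _ _).1 hy with h | h
                     · omega
                     · exact hs y h) hn]
      simp [hx]

-- A's partition loop computes the two filters
lemma partition_loop (xs : List Int) : ∀ (p n : List Int),
    xs.foldl (fun (acc : List Int × List Int) i =>
        if i < 0 then (acc.1, acc.2 ++ [i]) else (acc.1 ++ [i], acc.2)) (p, n)
      = (p ++ xs.filter (fun i => !decide (i < 0)), n ++ xs.filter (fun i => decide (i < 0))) := by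
  induction xs with
  | nil => intro p n; simp
  | cons x xs ih =>
    intro p n
    by_cases hx : x < 0 <;> simp [hx, ih]

-- ===== VERDICT (by name: the statement is the Claim_ definition above) =====
theorem sortPos_spec : Claim_equal_sortPos := by
  unfold Claim_equal_sortPos
  intro list _
  unfold Spec_sortPos sortPos sortPos_alt
  have hB : PySem.List.sorted2 list (fun x => decide (x < 0))
      (fun x => if x < 0 then 0 else x) false
      = list.foldl (fun acc x => PySem.List.insertBy pvBefore x acc) ([] ++ []) := by
    simp only [PySem.List.sorted2]
    rfl
  rw [hB, inv list [] [] (by simp) (by simp)]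
  show PySem.List.sorted
      (list.foldl (fun (acc : List Int × List Int) i =>
        if i < 0 then (acc.1, acc.2 ++ [i]) else (acc.1 ++ [i], acc.2)) ([], [])).1
      (fun x => x) false
    ++ (list.foldl (fun (acc : List Int × List Int) i =>
        if i < 0 then (acc.1, acc.2 ++ [i]) else (acc.1 ++ [i], acc.2)) ([], [])).2 = _
  rw [partition_loop list [] []]
  rw [PySem.List.sorted_eq_foldl_insertBy]
  simp
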